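-- pv_equiv track=rewrite | github.com/jestxfot/zapretgui | build_zapret/ssh_deploy.py | _version_to_filename_suffix
-- ===== SOURCE A (Python) =====
-- def _version_to_filename_suffix(ver: str) -> str:
--     v = (ver or "").strip().lstrip("v")
--     out: list[str] = []
--     prev_us = False
--     for ch in v:
--         if ch.isdigit():
--             out.append(ch)
--             prev_us = False
--             continue
--         if ch in {".", "_", "-"}:
--             if not prev_us:
--                 out.append("_")
--                 prev_us = True
--             continue
--     s = "".join(out).strip("_")
--     return s
-- ===== SOURCE B (Python) =====
-- def _version_to_filename_suffix(ver: str) -> str: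
--     v = (ver or "").strip().lstrip("v")
--     # pass 1: drop everything that is not a digit or a separator
--     kept = [c for c in v if c.isdigit() or c in "._-"]
--     # pass 2: copy digits; each maximal run of separators becomes one "_"
--     out: list[str] = []
--     i = 0
--     while i < len(kept):
--         if kept[i].isdigit():
--             out.append(kept[i])
--             i += 1
--         else:
--             out.append("_")
--             while i < len(kept) and not kept[i].isdigit():
--                 i += 1
--     return "".join(out).strip("_")
-- ===== Notes on version B (the rewrite author's own statement) =====
-- stated objective: alternative
-- what changed: Replaces A's single scan with a persisted prev_us flag by two passes: first filter out disallowed characters, then a run-consuming scan that emits one underscore per maximal separator run (inner skip loop, no flag).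
import Mathlib
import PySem

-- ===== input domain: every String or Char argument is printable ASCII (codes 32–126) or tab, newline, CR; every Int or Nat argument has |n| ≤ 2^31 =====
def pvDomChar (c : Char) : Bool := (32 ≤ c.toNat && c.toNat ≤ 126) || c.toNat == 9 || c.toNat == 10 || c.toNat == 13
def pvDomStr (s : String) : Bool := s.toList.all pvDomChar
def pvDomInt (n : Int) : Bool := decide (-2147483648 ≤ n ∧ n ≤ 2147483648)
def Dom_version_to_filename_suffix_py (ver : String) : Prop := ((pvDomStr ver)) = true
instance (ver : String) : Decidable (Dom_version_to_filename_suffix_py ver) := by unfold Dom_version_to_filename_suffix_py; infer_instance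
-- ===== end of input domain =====

-- B replaces A's single scan with a prev_us flag by filter-then-collapse-runs passes (objective: alternative, same cost).

-- ===== PORT A =====
-- the for-loop of A: state (out, prev_us); out appended at the right as in Python
def pvAuxLoopA : List Char → List Char → Bool → List Char
  | [], out, _ => out
  | c :: rest, out, prev =>
    if PySem.Chars.isdigit c then pvAuxLoopA rest (out ++ [c]) false
    else if c == '.' || c == '_' || c == '-' then
      (if !prev then pvAuxLoopA rest (out ++ ['_']) true else pvAuxLoopA rest out prev)
    else pvAuxLoopA rest out prev

def version_to_filename_suffix_py (ver : String) : String :=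
  -- (ver or "").strip().lstrip("v"); .lstrip("v") ported by hand as dropWhile (exact: drops every leading 'v')
  let v := (PySem.Str.strip (if ver = "" then "" else ver)).toList.dropWhile (· == 'v')
  let out := pvAuxLoopA v [] false
  String.ofList (PySem.Chars.stripChars out ['_'])

-- ===== PORT B =====
-- Source B's inner while loop skipping a separator run = dropWhile on the non-digit test
def pvAuxCollapse : List Char → List Char
  | [] => []
  | c :: rest =>
    if PySem.Chars.isdigit c then c :: pvAuxCollapse rest
    else '_' :: pvAuxCollapse (rest.dropWhile (fun d => !PySem.Chars.isdigit d))
termination_by cs => cs.length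
decreasing_by
  · simp
  · exact Nat.lt_succ_of_le (List.length_dropWhile_le _ _)

def version_to_filename_suffix_py_alt (ver : String) : String :=
  let v := (PySem.Str.strip (if ver = "" then "" else ver)).toList.dropWhile (· == 'v')
  let kept := v.filter (fun c => PySem.Chars.isdigit c || c == '.' || c == '_' || c == '-')
  String.ofList (PySem.Chars.stripChars (pvAuxCollapse kept) ['_'])

-- ===== PRECONDITION & SPEC =====
def Spec_version_to_filename_suffix_py (ver : String) (out : String) : Prop := out = version_to_filename_suffix_py_alt ver
instance (ver : String) (out : String) : Decidable (Spec_version_to_filename_suffix_py ver out) := by unfold Spec_version_to_filename_suffix_py; infer_instance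

-- ===== CLAIM (what is proved, stated in full; the proofs are below) =====
def Claim_equal_version_to_filename_suffix_py : Prop := ∀ (ver : String), Dom_version_to_filename_suffix_py ver → Spec_version_to_filename_suffix_py ver (version_to_filename_suffix_py ver)

-- ===== LEMMAS AND PROOFS =====

-- A's flag-scan equals B's filter-then-collapse; prev = true corresponds to a separator run already opened
theorem pvAuxLoopA_eq_collapse (cs : List Char) : ∀ (out : List Char),
    pvAuxLoopA cs out false
      = out ++ pvAuxCollapse (cs.filter (fun c => PySem.Chars.isdigit c || c == '.' || c == '_' || c == '-'))
  ∧ pvAuxLoopA cs out true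
      = out ++ pvAuxCollapse ((cs.filter (fun c => PySem.Chars.isdigit c || c == '.' || c == '_' || c == '-')).dropWhile (fun d => !PySem.Chars.isdigit d)) := by
  induction cs with
  | nil => intro out; simp [pvAuxLoopA, pvAuxCollapse]
  | cons c rest ih =>
    intro out
    by_cases hd : PySem.Chars.isdigit c = true
    · simp [pvAuxLoopA, hd, pvAuxCollapse,
        (ih (out ++ [c])).1]
    · by_cases hs : (c == '.' || c == '_' || c == '-') = true
      · constructor
        · simp [pvAuxLoopA, hd, hs, pvAuxCollapse,
            (ih (out ++ ['_'])).2]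
        · simp [pvAuxLoopA, hd, hs, (ih out).2]
      · simp [pvAuxLoopA, hd, hs, (ih out).1, (ih out).2]

theorem version_to_filename_suffix_py_spec : Claim_equal_version_to_filename_suffix_py := by
  intro ver _
  unfold Spec_version_to_filename_suffix_py version_to_filename_suffix_py version_to_filename_suffix_py_alt
  simp only [(pvAuxLoopA_eq_collapse _ []).1, List.nil_append]
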